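-- pv_equiv track=rewrite | github.com/fancyhf/middleHistory | nlp-service/services/word_frequency.py | _categorize_words
-- ===== SOURCE A (Python) =====
-- from typing import Dict, List, Tuple, Any
--
-- def _categorize_words(top_words: List[Tuple[str, int]], language: str) -> Dict[str, List[str]]:
--     """词汇分类"""
--     categories = {
--         'high_frequency': [],    # 高频词（前10%）
--         'medium_frequency': [],  # 中频词（10%-50%）
--         'low_frequency': [],     # 低频词（50%以后）
--         'single_occurrence': [], # 只出现一次的词
--         'long_words': [],        # 长词（>5个字符）
--         'short_words': []        # 短词（<=3个字符）
--     }
--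
--     if not top_words:
--         return categories
--
--     total_words = len(top_words)
--     high_threshold = max(1, total_words // 10)
--     medium_threshold = max(1, total_words // 2)
--
--     for i, (word, count) in enumerate(top_words):
--         # 按频率分类
--         if i < high_threshold:
--             categories['high_frequency'].append(word)
--         elif i < medium_threshold:
--             categories['medium_frequency'].append(word)
--         else:
--             categories['low_frequency'].append(word)
--
--         # 按出现次数分类
--         if count == 1:
--             categories['single_occurrence'].append(word)
--
--         # 按长度分类
--         if len(word) > 5:
--             categories['long_words'].append(word)
--         elif len(word) <= 3:
--             categories['short_words'].append(word)
--
--     return categories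
-- ===== SOURCE B (Python) =====
-- def _categorize_words(top_words, language):
--     categories = {
--         'high_frequency': [],
--         'medium_frequency': [],
--         'low_frequency': [],
--         'single_occurrence': [],
--         'long_words': [],
--         'short_words': []
--     }
--     if not top_words:
--         return categories
--     n = len(top_words)
--     high = max(1, n // 10)
--     medium = max(1, n // 2)
--     categories['high_frequency'] = [w for w, _ in top_words[:high]]
--     categories['medium_frequency'] = [w for w, _ in top_words[high:medium]]
--     categories['low_frequency'] = [w for w, _ in top_words[medium:]]
--     categories['single_occurrence'] = [w for w, c in top_words if c == 1]
--     categories['long_words'] = [w for w, _ in top_words if len(w) > 5]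
--     categories['short_words'] = [w for w, _ in top_words if len(w) <= 3]
--     return categories
-- ===== Notes on version B (the rewrite author's own statement) =====
-- stated objective: simpler
-- what changed: Replaces A's single index-branching loop appending into six lists by slice-based frequency partitioning (top_words[:high], [high:medium], [medium:]) plus three independent filter comprehensions for count==1, len>5 and len<=3.
import Mathlib
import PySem

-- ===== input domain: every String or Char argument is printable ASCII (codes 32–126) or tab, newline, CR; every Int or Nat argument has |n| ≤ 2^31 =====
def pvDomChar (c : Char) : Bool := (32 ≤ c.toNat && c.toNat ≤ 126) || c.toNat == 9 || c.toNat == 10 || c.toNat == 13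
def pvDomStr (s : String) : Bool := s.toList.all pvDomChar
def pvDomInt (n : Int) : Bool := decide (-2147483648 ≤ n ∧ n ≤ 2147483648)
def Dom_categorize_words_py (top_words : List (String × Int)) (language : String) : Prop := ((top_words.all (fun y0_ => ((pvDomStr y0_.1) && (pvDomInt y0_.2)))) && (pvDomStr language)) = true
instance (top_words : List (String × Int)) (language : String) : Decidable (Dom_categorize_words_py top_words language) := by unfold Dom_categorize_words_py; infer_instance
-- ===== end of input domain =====

-- B partitions by slicing at the two thresholds and filters the other three categories
-- in separate passes, instead of A's single enumerated loop branching on the index; same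
-- algorithmic cost, chosen for simplicity (objective: simpler).

-- ===== PORT A =====
-- the loop body of A: one enumerated element updates the six category lists
def pvStepA (ht mt : Int)
    (acc : List String × List String × List String × List String × List String × List String)
    (p : Int × (String × Int)) :
    List String × List String × List String × List String × List String × List String :=
  match acc, p with
  | (hf, mf, lf, so, lw, sw), (i, (w, c)) =>
    let fr :=
      if i < ht then (hf ++ [w], mf, lf)
      else if i < mt then (hf, mf ++ [w], lf)
      else (hf, mf, lf ++ [w])
    let so' := if c = 1 then so ++ [w] else so
    let ln :=
      if 5 < PySem.Str.len w then (lw ++ [w], sw)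
      else if PySem.Str.len w ≤ 3 then (lw, sw ++ [w])
      else (lw, sw)
    (fr.1, fr.2.1, fr.2.2, so', ln.1, ln.2)

def categorize_words_py (top_words : List (String × Int)) (language : String) : List (String × List String) :=
  if top_words.isEmpty then
    [("high_frequency", []), ("medium_frequency", []), ("low_frequency", []),
     ("single_occurrence", []), ("long_words", []), ("short_words", [])]
  else
    let total : Int := top_words.length
    let ht := max 1 (PySem.Int.floordiv total 10)
    let mt := max 1 (PySem.Int.floordiv total 2)
    let st := (PySem.List.enumerate top_words 0).foldl (pvStepA ht mt) ([], [], [], [], [], [])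
    [("high_frequency", st.1), ("medium_frequency", st.2.1), ("low_frequency", st.2.2.1),
     ("single_occurrence", st.2.2.2.1), ("long_words", st.2.2.2.2.1), ("short_words", st.2.2.2.2.2)]

-- ===== PORT B =====
def categorize_words_py_alt (top_words : List (String × Int)) (language : String) : List (String × List String) :=
  if top_words.isEmpty then
    [("high_frequency", []), ("medium_frequency", []), ("low_frequency", []),
     ("single_occurrence", []), ("long_words", []), ("short_words", [])]
  else
    let n : Int := top_words.length
    let high := max 1 (PySem.Int.floordiv n 10)
    let medium := max 1 (PySem.Int.floordiv n 2)
    [("high_frequency", (PySem.List.slice top_words none (some high)).map Prod.fst),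
     ("medium_frequency", (PySem.List.slice top_words (some high) (some medium)).map Prod.fst),
     ("low_frequency", (PySem.List.slice top_words (some medium) none).map Prod.fst),
     ("single_occurrence", (top_words.filter (fun p => p.2 = 1)).map Prod.fst),
     ("long_words", (top_words.filter (fun p => 5 < PySem.Str.len p.1)).map Prod.fst),
     ("short_words", (top_words.filter (fun p => PySem.Str.len p.1 ≤ 3)).map Prod.fst)]

-- ===== PRECONDITION & SPEC =====
def Spec_categorize_words_py (top_words : List (String × Int)) (language : String) (out : List (String × List String)) : Prop := out = categorize_words_py_alt top_words language
instance (top_words : List (String × Int)) (language : String) (out : List (String × List String)) : Decidable (Spec_categorize_words_py top_words language out) := by unfold Spec_categorize_words_py; infer_instance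

-- ===== CLAIM (what is proved, stated in full; the proofs are below) =====
def Claim_equal_categorize_words_py : Prop := ∀ (top_words : List (String × Int)) (language : String), Dom_categorize_words_py top_words language → Spec_categorize_words_py top_words language (categorize_words_py top_words language)

-- ===== LEMMAS AND PROOFS =====

-- closed form of A's loop: from start index k with accumulators a…f, the fold produces
-- the accumulators followed by the take/drop partition at the thresholds and the filters
set_option maxHeartbeats 1600000 in
theorem pvLoopA_spec (ht mt : Int) (hhm : ht ≤ mt) :
    ∀ (tw : List (String × Int)) (k : Int)
      (a b c d e f : List String),
      (PySem.List.enumerate tw k).foldl (pvStepA ht mt) (a, b, c, d, e, f) =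
        (a ++ (tw.take (ht - k).toNat).map Prod.fst,
         b ++ ((tw.drop (ht - k).toNat).take (mt - max ht k).toNat).map Prod.fst,
         c ++ (tw.drop (mt - k).toNat).map Prod.fst,
         d ++ (tw.filter (fun p => p.2 = 1)).map Prod.fst,
         e ++ (tw.filter (fun p => 5 < PySem.Str.len p.1)).map Prod.fst,
         f ++ (tw.filter (fun p => PySem.Str.len p.1 ≤ 3)).map Prod.fst) := by
  intro tw
  induction tw with
  | nil => intro k a b c d e f; simp [PySem.List.enumerate_nil]
  | cons x t ih =>
    intro k a b c d e f
    obtain ⟨w, c0⟩ := x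
    rw [PySem.List.enumerate_cons, List.foldl_cons, ih (k + 1)]
    by_cases hk1 : k < ht
    · rw [show (ht - k).toNat = (ht - (k + 1)).toNat + 1 from by omega,
         show (mt - k).toNat = (mt - (k + 1)).toNat + 1 from by omega,
         show max ht (k + 1) = ht from by omega,
         show max ht k = ht from by omega,
         List.take_succ_cons, List.drop_succ_cons, List.drop_succ_cons]
      by_cases hc : c0 = 1 <;> by_cases hl : 5 < PySem.Str.len w <;>
        by_cases hs : PySem.Str.len w ≤ 3 <;>
        simp_all [pvStepA] <;> (try omega) <;> split_ifs <;> simp_all <;> omega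
    · by_cases hk2 : k < mt
      · rw [show (ht - k).toNat = 0 from by omega,
           show (ht - (k + 1)).toNat = 0 from by omega,
           show (mt - k).toNat = (mt - (k + 1)).toNat + 1 from by omega,
           show max ht (k + 1) = k + 1 from by omega,
           show max ht k = k from by omega,
           show (mt - k).toNat = (mt - (k + 1)).toNat + 1 from by omega,
           List.drop_zero, List.drop_zero, List.take_succ_cons, List.drop_succ_cons]
        by_cases hc : c0 = 1 <;> by_cases hl : 5 < PySem.Str.len w <;>
          by_cases hs : PySem.Str.len w ≤ 3 <;>
          simp_all [pvStepA] <;> (try omega) <;> split_ifs <;> simp_all <;> omega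
      · rw [show (ht - k).toNat = 0 from by omega,
           show (ht - (k + 1)).toNat = 0 from by omega,
           show (mt - k).toNat = 0 from by omega,
           show (mt - (k + 1)).toNat = 0 from by omega,
           show (mt - max ht (k + 1)).toNat = 0 from by omega,
           show (mt - max ht k).toNat = 0 from by omega]
        clear ih
        by_cases hc : c0 = 1 <;> by_cases hl : 5 < PySem.Str.len w <;>
          by_cases hs : PySem.Str.len w ≤ 3 <;>
          simp_all [pvStepA] <;> (try omega) <;> split_ifs <;> simp_all <;> omega

-- ===== VERDICT (by name: the statement is the Claim_ definition above) =====
theorem categorize_words_py_spec : Claim_equal_categorize_words_py := by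
  intro tw language _
  unfold Spec_categorize_words_py categorize_words_py categorize_words_py_alt
  by_cases hemp : tw.isEmpty
  · simp [hemp]
  · simp only [hemp, if_false]
    have hd10 : PySem.Int.floordiv (tw.length : Int) 10 = ((tw.length / 10 : Nat) : Int) := by
      exact_mod_cast PySem.Int.floordiv_natCast tw.length 10
    have hd2 : PySem.Int.floordiv (tw.length : Int) 2 = ((tw.length / 2 : Nat) : Int) := by
      exact_mod_cast PySem.Int.floordiv_natCast tw.length 2
    have hdiv : tw.length / 10 ≤ tw.length / 2 := Nat.div_le_div_left (by omega) (by omega)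
    set ht := max 1 (PySem.Int.floordiv (tw.length : Int) 10) with hht
    set mt := max 1 (PySem.Int.floordiv (tw.length : Int) 2) with hmt
    have h1 : (1 : Int) ≤ ht := by omega
    have h1m : (1 : Int) ≤ mt := by omega
    have hhm : ht ≤ mt := by rw [hht, hmt, hd10, hd2]; omega
    rw [pvLoopA_spec ht mt hhm tw 0]
    have hs1 : PySem.List.slice tw none (some ht) = tw.take ht.toNat :=
      PySem.List.slice_to tw (by omega)
    have hs2 : PySem.List.slice tw (some ht) (some mt) =
        (tw.drop ht.toNat).take (mt.toNat - ht.toNat) :=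
      PySem.List.slice_toNat tw (by omega) (by omega)
    have hs3 : PySem.List.slice tw (some mt) none = tw.drop mt.toNat :=
      PySem.List.slice_from tw (by omega)
    have e1 : (ht - 0).toNat = ht.toNat := by omega
    have e2 : (mt - max ht 0).toNat = mt.toNat - ht.toNat := by omega
    have e3 : (mt - 0).toNat = mt.toNat := by omega
    simp [hs1, hs2, hs3, e1, e2, e3]
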